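-- pv_equiv track=rewrite | github.com/dmehrotra/uber-ocr | ocr/parse_lyft.py | ltry_order_e1
-- ===== SOURCE A (Python) =====
-- def ltry_order_e1(content):
-- 	line_index = None
-- 	for l in content:
-- 		if line_index == None:
-- 			if "earnings" in l and "calculate" not in l:
-- 				line_index = content.index(l)
-- 		else:
-- 			if "$" in l:
-- 				return l.split(" ")[-1]
-- ===== SOURCE B (Python) =====
-- def ltry_order_e1(content):
--     marks = [i for i, l in enumerate(content)
--              if "earnings" in l and "calculate" not in l]
--     dollars = [(i, l.split(" ")[-1]) for i, l in enumerate(content) if "$" in l]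
--     if not marks:
--         return None
--     m = marks[0]
--     cand = [tok for i, tok in dollars if i > m]
--     return cand[0] if cand else None
-- ===== Notes on version B (the rewrite author's own statement) =====
-- stated objective: alternative
-- what changed: Replaces A's fused early-exit state-machine loop by a materialize-and-join formulation: two comprehensions build the list of earnings-marker indices and the list of (index, last token) pairs of '$'-lines, and the answer is the first dollar pair whose index exceeds the first marker index.
import Mathlib
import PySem

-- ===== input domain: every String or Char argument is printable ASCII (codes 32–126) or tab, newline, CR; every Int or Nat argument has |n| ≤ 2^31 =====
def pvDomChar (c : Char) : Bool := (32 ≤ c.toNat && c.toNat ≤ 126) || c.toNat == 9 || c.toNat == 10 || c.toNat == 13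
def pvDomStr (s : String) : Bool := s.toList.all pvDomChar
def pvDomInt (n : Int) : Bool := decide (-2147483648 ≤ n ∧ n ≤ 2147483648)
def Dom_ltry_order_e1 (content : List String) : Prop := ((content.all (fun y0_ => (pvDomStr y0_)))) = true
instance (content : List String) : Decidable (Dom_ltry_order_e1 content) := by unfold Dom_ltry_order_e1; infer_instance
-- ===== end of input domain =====

-- B replaces A's fused early-exit state machine by a materialize-and-join formulation
-- (comprehensions collect marker indices and (index, token) pairs of '$'-lines, then join); objective: alternative.

-- shared tiny expressions, literal in both Pythons:
-- "earnings" in l and "calculate" not in l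
def pvEarn (l : String) : Bool :=
  PySem.Str.isIn "earnings" l && !(PySem.Str.isIn "calculate" l)
-- l.split(" ")[-1]
def pvSplitLast (l : String) : Option String :=
  (PySem.Str.split? l " ").bind (fun ps => PySem.List.pyGet? ps (-1))

-- ===== PORT A =====
-- the for-loop over content carrying the line_index flag (None / an int from content.index)
def ltry_order_e1_go (full : List String) : List String → Option Nat → Option String
  | [], _ => none
  | l :: rest, li =>
    match li with
    | none =>
      if pvEarn l then ltry_order_e1_go full rest (PySem.List.index? full l)
      else ltry_order_e1_go full rest none
    | some k =>
      if PySem.Str.isIn "$" l then pvSplitLast l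
      else ltry_order_e1_go full rest (some k)

def ltry_order_e1 (content : List String) : Option String :=
  ltry_order_e1_go content content none

-- ===== PORT B =====
-- marks = [i for i, l in enumerate(content) if "earnings" in l and "calculate" not in l]
-- dollars = [(i, l.split(" ")[-1]) for i, l in enumerate(content) if "$" in l]
-- cand = [tok for i, tok in dollars if i > m];  return cand[0] if cand else None
def ltry_order_e1_alt (content : List String) : Option String :=
  let marks := (PySem.List.enumerate content).filterMap
    (fun p => if pvEarn p.2 then some p.1 else none)
  let dollars := (PySem.List.enumerate content).filterMap
    (fun p => if PySem.Str.isIn "$" p.2 then some (p.1, pvSplitLast p.2) else none)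
  match marks with
  | [] => none
  | m :: _ =>
    match dollars.filterMap (fun p => if m < p.1 then some p.2 else none) with
    | [] => none
    | t :: _ => t

-- ===== PRECONDITION & SPEC =====
def Spec_ltry_order_e1 (content : List String) (out : Option String) : Prop := out = ltry_order_e1_alt content
instance (content : List String) (out : Option String) : Decidable (Spec_ltry_order_e1 content out) := by unfold Spec_ltry_order_e1; infer_instance

-- ===== CLAIM (what is proved, stated in full; the proofs are below) =====
def Claim_equal_ltry_order_e1 : Prop := ∀ (content : List String), Dom_ltry_order_e1 content → Spec_ltry_order_e1 content (ltry_order_e1 content)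

-- ===== LEMMAS AND PROOFS =====

-- canonical form both ports are reduced to: index of the first earnings line, first '$' line after it
def pvFindEarn : List String → Nat → Option Nat
  | [], _ => none
  | l :: rest, i => if pvEarn l then some i else pvFindEarn rest (i + 1)

def pvScanDollar : List String → Option String
  | [] => none
  | l :: rest => if PySem.Str.isIn "$" l then pvSplitLast l else pvScanDollar rest

-- once the flag is set (to any index), A's loop is exactly the '$' scan
theorem go_some (full : List String) (rest : List String) (k : Nat) :
    ltry_order_e1_go full rest (some k) = pvScanDollar rest := by
  induction rest with
  | nil => rfl
  | cons l t ih =>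
    simp only [ltry_order_e1_go, pvScanDollar]
    split <;> simp [ih]

theorem pvFindEarn_shift (ys : List String) (n : Nat) :
    pvFindEarn ys n = (pvFindEarn ys 0).map (· + n) := by
  induction ys generalizing n with
  | nil => rfl
  | cons y ys ihy =>
    by_cases hy : pvEarn y
    · simp [pvFindEarn, hy]
    · simp only [pvFindEarn, hy, if_neg, Bool.false_eq_true, not_false_iff,
        ihy (n + 1), ihy 1, Option.map_map]
      congr 1
      funext z
      simp; omega

-- A's loop in the searching state = find the earnings line, then scan after it
theorem go_none (full : List String) (xs : List String)
    (hsub : ∀ l ∈ xs, l ∈ full) :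
    ltry_order_e1_go full xs none =
      (match pvFindEarn xs 0 with
       | none => none
       | some i => pvScanDollar (xs.drop (i + 1))) := by
  induction xs with
  | nil => rfl
  | cons l t ih =>
    by_cases he : pvEarn l
    · have hmem : l ∈ full := hsub l (by simp)
      obtain ⟨k, hk⟩ := (PySem.List.index?_isSome_iff full l).mpr hmem |> Option.isSome_iff_exists.mp
      simp only [ltry_order_e1_go, pvFindEarn, he, if_pos, hk]
      simpa using go_some full t k
    · have ht : ∀ m ∈ t, m ∈ full := fun m hm => hsub m (by simp [hm])
      simp only [ltry_order_e1_go, he, Bool.false_eq_true, ite_false, pvFindEarn, ih ht,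
        pvFindEarn_shift t 1]
      cases hft : pvFindEarn t 0 with
      | none => simp
      | some i => simp [List.drop_succ_cons]

-- B-side: head of the marks comprehension = pvFindEarn
theorem marks_head (xs : List String) (s : Int) :
    ((PySem.List.enumerate xs s).filterMap
      (fun p => if pvEarn p.2 then some p.1 else none)).head? =
      (pvFindEarn xs 0).map (fun i => s + (i : Int)) := by
  induction xs generalizing s with
  | nil => rfl
  | cons l t ih =>
    by_cases he : pvEarn l
    · simp [PySem.List.enumerate_cons, List.filterMap_cons, he, pvFindEarn]
    · simp only [PySem.List.enumerate_cons, List.filterMap_cons, he, Bool.false_eq_true,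
        ite_false, pvFindEarn, ih (s + 1), pvFindEarn_shift t 1]
      cases pvFindEarn t 0 with
      | none => simp
      | some i => simp; push_cast; ring

-- B-side: indices before the cut produce nothing
theorem dollars_prefix_nil (m : Int) (xs : List String) (s : Int)
    (h : s + xs.length ≤ m + 1) :
    ((PySem.List.enumerate xs s).filterMap
      (fun p => if PySem.Str.isIn "$" p.2 then some (p.1, pvSplitLast p.2) else none)).filterMap
      (fun p => if m < p.1 then some p.2 else none) = [] := by
  induction xs generalizing s with
  | nil => rfl
  | cons l t ih =>
    have hs : ¬ m < s := by simp at h; omega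
    by_cases hd : PySem.Str.isIn "$" l = true
    · simp only [PySem.List.enumerate_cons, List.filterMap_cons, if_pos hd, if_neg hs]
      exact ih (s + 1) (by simp at h ⊢; omega)
    · simp only [PySem.List.enumerate_cons, List.filterMap_cons, if_neg hd]
      exact ih (s + 1) (by simp at h ⊢; omega)

-- B-side: indices after the cut all pass, and the join's head is the '$' scan
theorem dollars_suffix_scan (m : Int) (xs : List String) (s : Int) (h : m < s) :
    (match ((PySem.List.enumerate xs s).filterMap
      (fun p => if PySem.Str.isIn "$" p.2 then some (p.1, pvSplitLast p.2) else none)).filterMap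
      (fun p => if m < p.1 then some p.2 else none) with
     | [] => none
     | t :: _ => t) = pvScanDollar xs := by
  induction xs generalizing s with
  | nil => rfl
  | cons l t ih =>
    by_cases hd : PySem.Str.isIn "$" l = true
    · simp only [PySem.List.enumerate_cons, List.filterMap_cons, if_pos hd, if_pos h,
        pvScanDollar]
    · simp only [PySem.List.enumerate_cons, List.filterMap_cons, if_neg hd, pvScanDollar]
      exact ih (s + 1) (by omega)

theorem pvFindEarn_lt_length (xs : List String) (i : Nat)
    (h : pvFindEarn xs 0 = some i) : i < xs.length := by
  induction xs generalizing i with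
  | nil => simp [pvFindEarn] at h
  | cons l t ih =>
    by_cases he : pvEarn l
    · simp [pvFindEarn, he] at h; simp only [List.length_cons]; omega
    · simp only [pvFindEarn, he, Bool.false_eq_true, ite_false, pvFindEarn_shift t 1] at h
      cases hft : pvFindEarn t 0 with
      | none => simp [hft] at h
      | some j =>
        have hj := ih j hft
        simp [hft] at h
        simp only [List.length_cons]
        omega

-- B equals the canonical form
theorem alt_canonical (content : List String) :
    ltry_order_e1_alt content =
      (match pvFindEarn content 0 with
       | none => none
       | some i => pvScanDollar (content.drop (i + 1))) := by
  simp only [ltry_order_e1_alt]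
  have hm := marks_head content 0
  cases hfe : pvFindEarn content 0 with
  | none =>
    rw [hfe] at hm
    rw [List.head?_eq_none_iff.mp hm]
  | some i =>
    rw [hfe] at hm
    simp only [Option.bind, Option.map, pure, zero_add] at hm
    obtain ⟨rest, hrest⟩ : ∃ rest, (PySem.List.enumerate content 0).filterMap
        (fun p => if pvEarn p.2 then some p.1 else none) = (i : Int) :: rest := by
      cases hcase : (PySem.List.enumerate content 0).filterMap
        (fun p => if pvEarn p.2 then some p.1 else none) with
      | nil => rw [hcase] at hm; simp at hm
      | cons a r => rw [hcase] at hm; simp at hm; exact ⟨r, by rw [hm]⟩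
    simp only [hrest]
    have hi := pvFindEarn_lt_length content i hfe
    have hsplit : content = content.take (i + 1) ++ content.drop (i + 1) := (List.take_append_drop _ _).symm
    have hlen : (content.take (i + 1)).length = i + 1 := by
      simp; omega
    conv_lhs => rw [hsplit]
    rw [PySem.List.enumerate_append, List.filterMap_append, List.filterMap_append,
      dollars_prefix_nil (i : Int) _ 0 (by rw [hlen]; push_cast; omega)]
    simp only [List.nil_append, hlen]
    exact dollars_suffix_scan (i : Int) _ _ (by push_cast; omega)

-- ===== VERDICT (by name: the statement is the Claim_ definition above) =====
theorem ltry_order_e1_spec : Claim_equal_ltry_order_e1 := by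
  unfold Claim_equal_ltry_order_e1
  intro content _
  unfold Spec_ltry_order_e1 ltry_order_e1
  rw [go_none content content (fun _ h => h), alt_canonical]
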